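-- pv_equiv track=rewrite | github.com/FarhanSayed16/civic-issue-reporter | civic_issue_backend/app/services/issue_service.py | _check_image_similarity
-- ===== SOURCE A (Python) =====
-- from typing import List, Optional
--
-- def _check_image_similarity(urls1: List[str], urls2: List[str]) -> bool:
--     """Check if images are similar (simplified check for same URLs or similar filenames)"""
--     # For now, we'll do a simple URL comparison
--     # In a real implementation, you'd use image hashing or computer vision
--     for url1 in urls1:
--         for url2 in urls2:
--             # Extract filename from URL
--             filename1 = url1.split('/')[-1].split('.')[0]
--             filename2 = url2.split('/')[-1].split('.')[0]
--
--             # Simple similarity check (same filename or very similar)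
--             if filename1 == filename2 or abs(len(filename1) - len(filename2)) <= 2:
--                 return True
--
--     return False
-- ===== SOURCE B (Python) =====
-- def _check_image_similarity(urls1, urls2):
--     """Check if images are similar (simplified check for same URLs or similar filenames)"""
--     # Equal filenames have equal lengths, so A's test reduces to a length test:
--     # hash the filename lengths of urls1 once, then scan urls2 checking length +/- 2.
--     def _name_len(url):
--         return len(url.split('/')[-1].split('.')[0])
--     lens = {_name_len(u) for u in urls1}
--     return any(_name_len(u) + d in lens for u in urls2 for d in (-2, -1, 0, 1, 2))
-- ===== Notes on version B (the rewrite author's own statement) =====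
-- stated objective: alternative
-- what changed: Replaced the nested all-pairs loop (whose filename-equality test is redundant, since equal filenames always have equal lengths) by hashing the filename lengths of urls1 into a set once and scanning urls2 checking membership of length-2..length+2; better worst case but no early exit, so not measurably faster on random inputs.
import Mathlib
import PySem

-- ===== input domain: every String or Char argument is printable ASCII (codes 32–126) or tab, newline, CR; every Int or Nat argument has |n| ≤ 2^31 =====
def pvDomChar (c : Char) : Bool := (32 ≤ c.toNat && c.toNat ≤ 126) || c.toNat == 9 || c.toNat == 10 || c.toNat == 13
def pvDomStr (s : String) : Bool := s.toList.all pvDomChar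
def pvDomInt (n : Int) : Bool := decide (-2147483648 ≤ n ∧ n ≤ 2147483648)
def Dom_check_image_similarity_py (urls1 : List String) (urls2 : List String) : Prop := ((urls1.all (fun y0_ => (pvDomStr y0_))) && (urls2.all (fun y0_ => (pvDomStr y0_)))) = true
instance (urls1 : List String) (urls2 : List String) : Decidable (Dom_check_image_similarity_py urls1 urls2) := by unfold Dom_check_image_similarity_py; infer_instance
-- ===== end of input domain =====

-- B replaces A's nested all-pairs scan by a hash set of filename lengths and a single per-url scan (alternative algorithm).

-- ===== PORT A =====
-- url.split('/')[-1].split('.')[0]  (split on a nonempty separator never returns an empty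
-- list, so the [-1]/[0] defaults of pyGetD are never used; filename kept as List Char,
-- equality on List Char is Python's string equality)
def pvFnameA (url : String) : List Char :=
  PySem.List.pyGetD
    (PySem.Chars.splitOn
      (PySem.List.pyGetD (PySem.Chars.splitOn url.toList ['/']) (-1) []) ['.']) 0 []

def check_image_similarity_py (urls1 : List String) (urls2 : List String) : Bool :=
  urls1.any (fun url1 => urls2.any (fun url2 =>
    let filename1 := pvFnameA url1
    let filename2 := pvFnameA url2
    filename1 == filename2 ||
      decide (|(filename1.length : Int) - (filename2.length : Int)| ≤ 2)))

-- ===== PORT B =====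
-- len(url.split('/')[-1].split('.')[0])
def pvNameLenB (url : String) : Int :=
  (PySem.List.pyGetD
    (PySem.Chars.splitOn
      (PySem.List.pyGetD (PySem.Chars.splitOn url.toList ['/']) (-1) []) ['.']) 0 []).length

def check_image_similarity_py_alt (urls1 : List String) (urls2 : List String) : Bool :=
  let lens : PySem.Set Int := PySem.Set.ofList (urls1.map pvNameLenB)
  urls2.any (fun u => [(-2 : Int), -1, 0, 1, 2].any (fun d => PySem.Set.contains lens (pvNameLenB u + d)))

-- ===== PRECONDITION & SPEC =====
def Spec_check_image_similarity_py (urls1 : List String) (urls2 : List String) (out : Bool) : Prop := out = check_image_similarity_py_alt urls1 urls2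
instance (urls1 : List String) (urls2 : List String) (out : Bool) : Decidable (Spec_check_image_similarity_py urls1 urls2 out) := by unfold Spec_check_image_similarity_py; infer_instance

-- ===== CLAIM (what is proved, stated in full; the proofs are below) =====
def Claim_equal_check_image_similarity_py : Prop := ∀ (urls1 : List String) (urls2 : List String), Dom_check_image_similarity_py urls1 urls2 → Spec_check_image_similarity_py urls1 urls2 (check_image_similarity_py urls1 urls2)

-- ===== LEMMAS AND PROOFS =====

theorem pvNameLenB_eq (u : String) : pvNameLenB u = ((pvFnameA u).length : Int) := rfl

theorem pv_equal (urls1 urls2 : List String) :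
    check_image_similarity_py urls1 urls2 = check_image_similarity_py_alt urls1 urls2 := by
  unfold check_image_similarity_py check_image_similarity_py_alt
  rw [Bool.eq_iff_iff]
  simp only [List.any_eq_true, Bool.or_eq_true, beq_iff_eq, decide_eq_true_eq,
    PySem.Set.contains_iff, PySem.Set.mem_ofList, List.mem_map, pvNameLenB_eq]
  constructor
  · rintro ⟨u1, h1, u2, h2, hc⟩
    have hlen : |((pvFnameA u1).length : Int) - ((pvFnameA u2).length : Int)| ≤ 2 := by
      rcases hc with h | h
      · rw [h]; simp
      · exact h
    refine ⟨u2, h2, ((pvFnameA u1).length : Int) - ((pvFnameA u2).length : Int), ?_,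
      u1, h1, by ring⟩
    have := abs_le.mp hlen
    simp only [List.mem_cons, List.mem_singleton, List.not_mem_nil, or_false]
    omega
  · rintro ⟨u2, h2, d, hd, u1, h1, hlen⟩
    refine ⟨u1, h1, u2, h2, Or.inr ?_⟩
    simp only [List.mem_cons, List.mem_singleton, List.not_mem_nil, or_false] at hd
    rw [abs_le]
    omega

-- ===== VERDICT (by name: the statement is the Claim_ definition above) =====
theorem check_image_similarity_py_spec : Claim_equal_check_image_similarity_py := by
  intro urls1 urls2 _
  exact pv_equal urls1 urls2
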